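-- pv_equiv track=rewrite | github.com/cognitedata/toolkit | cognite_toolkit/_cdf_tk/commands/about.py | _find_similar_table
-- ===== SOURCE A (Python) =====
-- def _find_similar_table(unrecognized: str, valid_tables: set[str]) -> str | None:
--     """Find a similar valid table by comparing alphabetical characters only."""
--     # Keep only alphabetical characters and lowercase
--     normalized_unrecognized = "".join(c for c in unrecognized if c.isalpha()).lower()
--
--     # First, try exact match (after normalization)
--     for valid in valid_tables:
--         normalized_valid = "".join(c for c in valid if c.isalpha()).lower()
--         if normalized_unrecognized == normalized_valid:
--             return valid
--
--     # If no match, check for singular/plural variations (missing/extra 's')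
--     for valid in valid_tables:
--         normalized_valid = "".join(c for c in valid if c.isalpha()).lower()
--
--         # Check if adding 's' to unrecognized matches valid (e.g., "plugin" -> "plugins")
--         if normalized_unrecognized + "s" == normalized_valid:
--             return valid
--
--     return None
-- ===== SOURCE B (Python) =====
-- def _find_similar_table(unrecognized: str, valid_tables: set[str]) -> str | None:
--     """Find a similar valid table by comparing alphabetical characters only."""
--     target = "".join(c for c in unrecognized if c.isalpha()).lower()
--     # Single pass with an accumulator: return at once on an exact normalized match
--     # (so any exact match anywhere beats any plural match), otherwise remember the
--     # FIRST table whose normalized form is the plural of the target.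
--     plural = None
--     for valid in valid_tables:
--         norm = "".join(c for c in valid if c.isalpha()).lower()
--         if norm == target:
--             return valid
--         if plural is None and norm == target + "s":
--             plural = valid
--     return plural
-- ===== Notes on version B (the rewrite author's own statement) =====
-- stated objective: simpler
-- what changed: Replaces A's two staged scans (each re-normalizing every valid table) with a single pass carrying a 'first plural candidate' accumulator: it returns immediately on an exact normalized match and otherwise falls back to the remembered plural candidate, normalizing each table once.
import Mathlib
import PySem

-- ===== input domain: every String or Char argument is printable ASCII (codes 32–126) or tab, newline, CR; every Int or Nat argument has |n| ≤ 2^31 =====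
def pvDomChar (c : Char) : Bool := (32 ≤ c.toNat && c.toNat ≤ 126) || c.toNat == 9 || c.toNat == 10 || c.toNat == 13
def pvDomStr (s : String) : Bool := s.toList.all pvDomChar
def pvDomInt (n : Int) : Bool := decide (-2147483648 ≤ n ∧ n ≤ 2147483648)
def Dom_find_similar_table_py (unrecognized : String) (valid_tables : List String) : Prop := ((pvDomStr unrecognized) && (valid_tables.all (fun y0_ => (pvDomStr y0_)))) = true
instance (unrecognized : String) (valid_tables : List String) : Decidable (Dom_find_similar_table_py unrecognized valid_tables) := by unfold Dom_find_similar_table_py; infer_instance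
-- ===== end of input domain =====

-- B merges A's two staged scans into one pass with a 'first plural candidate'
-- accumulator (objective: simpler — each table is normalized once, one loop).
-- ===== PORT A =====
-- "".join(c for c in s if c.isalpha()).lower()
def pvNorm (s : String) : String :=
  PySem.Str.lower (String.ofList (s.toList.filter PySem.Chars.isalpha))

-- first for-loop of A: exact match after normalization
def pvFindExact (nu : String) : List String → Option String
  | [] => none
  | valid :: rest =>
    if nu = pvNorm valid then some valid else pvFindExact nu rest

-- second for-loop of A: plural (missing/extra 's') match
def pvFindPlural (nu : String) : List String → Option String
  | [] => none
  | valid :: rest =>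
    if nu ++ "s" = pvNorm valid then some valid else pvFindPlural nu rest

def find_similar_table_py (unrecognized : String) (valid_tables : List String) : Option String :=
  let nu := pvNorm unrecognized
  match pvFindExact nu valid_tables with
  | some v => some v
  | none => pvFindPlural nu valid_tables

-- ===== PORT B =====
-- B's single loop: return on exact match, carry the first plural candidate.
def pvScan (target : String) (plural : Option String) : List String → Option String
  | [] => plural
  | valid :: rest =>
    let norm := pvNorm valid
    if norm = target then some valid
    else pvScan target
      (if plural = none ∧ norm = target ++ "s" then some valid else plural) rest

def find_similar_table_py_alt (unrecognized : String) (valid_tables : List String) : Option String :=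
  let target := pvNorm unrecognized
  pvScan target none valid_tables

-- ===== PRECONDITION & SPEC =====
def Spec_find_similar_table_py (unrecognized : String) (valid_tables : List String) (out : Option String) : Prop := out = find_similar_table_py_alt unrecognized valid_tables
instance (unrecognized : String) (valid_tables : List String) (out : Option String) : Decidable (Spec_find_similar_table_py unrecognized valid_tables out) := by unfold Spec_find_similar_table_py; infer_instance

-- ===== CLAIM (what is proved, stated in full; the proofs are below) =====
def Claim_equal_find_similar_table_py : Prop := ∀ (unrecognized : String) (valid_tables : List String), Dom_find_similar_table_py unrecognized valid_tables → Spec_find_similar_table_py unrecognized valid_tables (find_similar_table_py unrecognized valid_tables)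

-- ===== LEMMAS AND PROOFS =====

-- The one-pass scan equals: exact match first, else the carried plural, else the plural scan.
theorem pvScan_eq (nu : String) (pl : Option String) (l : List String) :
    pvScan nu pl l =
      match pvFindExact nu l with
      | some v => some v
      | none =>
        match pl with
        | some p => some p
        | none => pvFindPlural nu l := by
  induction l generalizing pl with
  | nil => cases pl <;> rfl
  | cons v rest ih =>
    simp only [pvScan, pvFindExact, pvFindPlural]
    by_cases hx : pvNorm v = nu
    · simp [hx]
    · rw [if_neg hx, if_neg (show ¬(nu = pvNorm v) from fun h => hx h.symm), ih]
      cases hfe : pvFindExact nu rest with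
      | some w => simp
      | none =>
        cases pl with
        | some p => simp
        | none =>
          by_cases hp : pvNorm v = nu ++ "s"
          · rw [if_pos ⟨rfl, hp⟩, if_pos hp.symm]
          · rw [if_neg (show ¬((none : Option String) = none ∧ pvNorm v = nu ++ "s") from fun h => hp h.2), if_neg (show ¬(nu ++ "s" = pvNorm v) from fun h => hp h.symm)]

-- ===== VERDICT (by name: the statement is the Claim_ definition above) =====
theorem find_similar_table_py_spec : Claim_equal_find_similar_table_py := by
  intro u vt _
  unfold Spec_find_similar_table_py find_similar_table_py find_similar_table_py_alt
  rw [pvScan_eq]
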